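-- pv_equiv track=rewrite | github.com/dp9898cz/cypher_el_sign | digitalni_podpis.py | split_into_list
-- ===== SOURCE A (Python) =====
-- def split_into_list(my_text):
--     temp = []
--     encrypted_list = []
--     encrypted_segment = ''
--     i = 0
--     for character in my_text:
--         if i == 5:
--             for item in temp:
--                 encrypted_segment += item
--             encrypted_list.append(int(encrypted_segment, 2))
--             encrypted_segment = ''
--             temp = []
--             i = 0
--         temp.append(bin(ord(character))[2:].zfill(10))
--         i += 1
--     if temp:
--         for item in temp:
--             encrypted_segment += item
--         encrypted_list.append(int(encrypted_segment, 2))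
--
--     return encrypted_list
-- ===== SOURCE B (Python) =====
-- def split_into_list(my_text):
--     out = []
--     rest = my_text
--     while rest:
--         head, rest = rest[:5], rest[5:]
--         val = 0
--         for c in head:
--             val = (val << 10) + ord(c)
--         out.append(val)
--     return out
-- ===== Notes on version B (the rewrite author's own statement) =====
-- stated objective: simpler
-- what changed: Replaces the binary-string building (bin/zfill/concatenate/int(.,2)) and the temp/i accumulator state machine with a short loop that takes 5-character chunks off the front and packs each chunk by 10-bit integer shift arithmetic.
import Mathlib
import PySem

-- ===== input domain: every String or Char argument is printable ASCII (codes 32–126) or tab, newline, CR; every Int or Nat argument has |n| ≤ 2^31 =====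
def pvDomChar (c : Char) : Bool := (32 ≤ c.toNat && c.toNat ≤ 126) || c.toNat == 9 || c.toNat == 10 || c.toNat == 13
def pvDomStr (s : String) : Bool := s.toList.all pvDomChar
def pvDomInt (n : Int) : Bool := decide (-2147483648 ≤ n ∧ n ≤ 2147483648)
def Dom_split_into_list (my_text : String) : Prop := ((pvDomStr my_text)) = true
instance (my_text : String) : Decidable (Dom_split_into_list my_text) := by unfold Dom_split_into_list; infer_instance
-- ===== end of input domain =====

-- B replaces A's binary-string building (bin/zfill/concat/int(.,2)) and temp/i state machine
-- with a recursion over 5-character chunks packed by 10-bit integer shifts (objective: simpler).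

-- ===== PORT A =====

-- bin(n)[2:] without the leading "0b", as a list of '0'/'1' chars ("" for n = 0); exact hand port
def pvBits : Nat → List Char
  | 0 => []
  | n + 1 => pvBits ((n + 1) / 2) ++ [if (n + 1) % 2 = 1 then '1' else '0']
  decreasing_by omega

-- bin(n)[2:] (Python prints "0" for 0)
def pvBinChars (n : Nat) : List Char := if n = 0 then ['0'] else pvBits n

-- s.zfill(10) for a sign-free digit string: left-pad with '0' to length 10 (never truncates)
def pvZfill10 (s : List Char) : List Char := List.replicate (10 - s.length) '0' ++ s

-- bin(ord(character))[2:].zfill(10)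
def pvEnc10 (c : Char) : List Char := pvZfill10 (pvBinChars c.toNat)

-- int(s, 2) for a string of binary digits; exact on the '0'/'1' strings A builds
def pvParse2 (s : List Char) : Int :=
  s.foldl (fun a c => 2 * a + (if c = '1' then 1 else 0)) 0

-- one iteration of A's 'for character in my_text' loop over state (temp, encrypted_list, encrypted_segment, i)
def pvStepA (st : List (List Char) × List Int × List Char × Nat) (c : Char) :
    List (List Char) × List Int × List Char × Nat :=
  let (temp, enc, seg, i) := st
  let (temp, enc, seg, i) :=
    if i = 5 then
      ([], enc ++ [pvParse2 (temp.foldl (· ++ ·) seg)], [], 0)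
    else (temp, enc, seg, i)
  (temp ++ [pvEnc10 c], enc, seg, i + 1)

-- the trailing 'if temp:' block
def pvFinA (st : List (List Char) × List Int × List Char × Nat) : List Int :=
  let (temp, enc, seg, _) := st
  if temp = [] then enc else enc ++ [pvParse2 (temp.foldl (· ++ ·) seg)]

def split_into_list (my_text : String) : List Int :=
  pvFinA (my_text.toList.foldl pvStepA ([], [], [], 0))

-- ===== PORT B =====

-- one step of B's inner loop: val = (val << 10) + ord(c)
def pvPackStep (v : Int) (c : Char) : Int := (v <<< (10:Nat)) + (c.toNat : Int)

def pvPackB (chunk : List Char) : Int := chunk.foldl pvPackStep 0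

-- B's recursion on my_text (rest[:5] / rest[5:] ported as take/drop on the char list; exact)
def pvAltGo : List Char → List Int
  | [] => []
  | c :: rest => pvPackB ((c :: rest).take 5) :: pvAltGo ((c :: rest).drop 5)
  termination_by l => l.length
  decreasing_by simp only [List.length_drop, List.length_cons]; omega

def split_into_list_alt (my_text : String) : List Int := pvAltGo my_text.toList

-- ===== PRECONDITION & SPEC =====
def Spec_split_into_list (my_text : String) (out : List Int) : Prop := out = split_into_list_alt my_text
instance (my_text : String) (out : List Int) : Decidable (Spec_split_into_list my_text out) := by unfold Spec_split_into_list; infer_instance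

-- ===== CLAIM (what is proved, stated in full; the proofs are below) =====
def Claim_equal_split_into_list : Prop := ∀ (my_text : String), Dom_split_into_list my_text → Spec_split_into_list my_text (split_into_list my_text)

-- ===== LEMMAS AND PROOFS =====

theorem pvParse2_shift (s : List Char) (a : Int) :
    s.foldl (fun a c => 2 * a + (if c = '1' then 1 else 0)) a
      = a * 2 ^ s.length + pvParse2 s := by
  induction s generalizing a with
  | nil => simp [pvParse2]
  | cons c t ih =>
    simp only [List.foldl_cons, List.length_cons, pvParse2] at *
    rw [ih, ih (2 * 0 + _)]
    ring

theorem pvParse2_append (s t : List Char) :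
    pvParse2 (s ++ t) = pvParse2 s * 2 ^ t.length + pvParse2 t := by
  unfold pvParse2
  rw [List.foldl_append, pvParse2_shift]
  rfl

theorem pvParse2_zeros (k : Nat) : pvParse2 (List.replicate k '0') = 0 := by
  induction k with
  | zero => rfl
  | succ n ih =>
    rw [List.replicate_succ, show pvParse2 ('0' :: List.replicate n '0')
      = List.foldl (fun a c => 2 * a + (if c = '1' then 1 else 0)) 0 (List.replicate n '0') from rfl,
      pvParse2_shift, ih]
    simp

theorem pvParse2_bits (n : Nat) : pvParse2 (pvBits n) = n := by
  induction n using Nat.strong_induction_on with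
  | _ n ih =>
    match n with
    | 0 => simp [pvBits, pvParse2]
    | m + 1 =>
      rw [pvBits, pvParse2_append, ih ((m + 1) / 2) (by omega)]
      by_cases h : (m + 1) % 2 = 1 <;> simp [pvParse2, h] <;> omega

theorem pvParse2_binChars (n : Nat) : pvParse2 (pvBinChars n) = n := by
  unfold pvBinChars
  split
  · simp_all [pvParse2]
  · exact pvParse2_bits n

theorem pvParse2_enc10 (c : Char) : pvParse2 (pvEnc10 c) = c.toNat := by
  unfold pvEnc10 pvZfill10
  rw [pvParse2_append, pvParse2_zeros, pvParse2_binChars]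
  simp

theorem pvBits_length_le (n k : Nat) (h : n < 2 ^ k) : (pvBits n).length ≤ k := by
  induction n using Nat.strong_induction_on generalizing k with
  | _ n ih =>
    match n with
    | 0 => simp [pvBits]
    | m + 1 =>
      have hk : 1 ≤ k := by
        by_contra hc
        interval_cases k <;> omega
      rw [pvBits]
      have h2 : (m + 1) / 2 < 2 ^ (k - 1) := by
        have : 2 ^ k = 2 * 2 ^ (k - 1) := by
          rw [← pow_succ']
          congr 1
          omega
        omega
      have := ih ((m + 1) / 2) (by omega) (k - 1) h2
      simp only [List.length_append, List.length_cons, List.length_nil]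
      omega

theorem pvEnc10_length (c : Char) (h : c.toNat < 1024) : (pvEnc10 c).length = 10 := by
  have hb : (pvBinChars c.toNat).length ≤ 10 := by
    unfold pvBinChars
    split
    · simp
    · exact pvBits_length_le _ 10 h
  unfold pvEnc10 pvZfill10
  simp only [List.length_append, List.length_replicate]
  omega

theorem pvFlatten_len (l : List Char) (h : ∀ c ∈ l, c.toNat < 1024) :
    (List.map pvEnc10 l).flatten.length = 10 * l.length := by
  induction l with
  | nil => simp
  | cons c t ih =>
    simp only [List.map_cons, List.flatten_cons, List.length_append, List.length_cons]
    rw [pvEnc10_length c (h c (by simp)), ih (fun x hx => h x (by simp [hx]))]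
    ring

theorem pvPackB_go (l : List Char) (v : Int) (h : ∀ c ∈ l, c.toNat < 1024) :
    l.foldl pvPackStep v
      = v * 2 ^ (10 * l.length) + pvParse2 (List.map pvEnc10 l).flatten := by
  induction l generalizing v with
  | nil => simp [pvParse2]
  | cons c t ih =>
    simp only [List.foldl_cons, List.map_cons, List.flatten_cons, List.length_cons]
    rw [show pvPackStep v c = v * 2 ^ 10 + (c.toNat : Int) by
        rw [pvPackStep, Int.shiftLeft_eq],
      ih _ (fun x hx => h x (by simp [hx])),
      pvParse2_append, pvParse2_enc10, pvFlatten_len t (fun x hx => h x (by simp [hx]))]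
    rw [show 10 * (t.length + 1) = 10 * t.length + 10 by ring, pow_add]
    ring

theorem pvPackB_eq (l : List Char) (h : ∀ c ∈ l, c.toNat < 1024) :
    pvPackB l = pvParse2 (List.map pvEnc10 l).flatten := by
  unfold pvPackB
  rw [pvPackB_go l 0 h]
  simp

theorem pvFoldlAppend (L : List (List Char)) (s : List Char) :
    L.foldl (· ++ ·) s = s ++ L.flatten := by
  induction L generalizing s with
  | nil => simp
  | cons a t ih => simp [ih]

theorem pvFill (a : List Char) (temp : List (List Char)) (enc : List Int)
    (h : temp.length + a.length ≤ 5) :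
    a.foldl pvStepA (temp, enc, [], temp.length)
      = (temp ++ a.map pvEnc10, enc, [], temp.length + a.length) := by
  induction a generalizing temp with
  | nil => simp
  | cons c t ih =>
    simp only [List.foldl_cons, List.map_cons]
    have hi : temp.length ≠ 5 := by simp at h; omega
    have hstep : pvStepA (temp, enc, [], temp.length) c
        = (temp ++ [pvEnc10 c], enc, [], temp.length + 1) := by
      simp [pvStepA, hi]
    rw [hstep]
    have := ih (temp ++ [pvEnc10 c]) (by simp at h ⊢; omega)
    simp only [List.length_append, List.length_cons, List.length_nil] at this ⊢
    rw [this]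
    simp only [List.append_assoc, List.cons_append, List.nil_append, Prod.mk.injEq]
    exact ⟨trivial, trivial, trivial, by omega⟩

theorem pvMain : ∀ (n : Nat) (l : List Char), l.length ≤ n →
    ∀ enc : List Int, (∀ c ∈ l, c.toNat < 1024) →
    pvFinA (l.foldl pvStepA ([], enc, [], 0)) = enc ++ pvAltGo l := by
  intro n
  induction n with
  | zero =>
    intro l hl enc _
    have : l = [] := List.length_eq_zero_iff.mp (by omega)
    subst this
    rw [pvAltGo]
    simp [pvFinA]
  | succ n ih =>
    intro l hl enc hc
    by_cases hnil : l = []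
    · subst hnil
      rw [pvAltGo]
      simp [pvFinA]
    · obtain ⟨c0, rest, rfl⟩ := List.exists_cons_of_ne_nil hnil
      set m : List Char := c0 :: rest with hm
      by_cases h5 : m.length ≤ 5
      · -- single (possibly partial) chunk
        have hfill := pvFill m [] enc (by simpa using h5)
        simp only [List.length_nil, List.nil_append, Nat.zero_add] at hfill
        rw [hfill]
        have hne : m.map pvEnc10 ≠ [] := by simp [hm]
        rw [pvFinA]
        simp only [if_neg hne]
        rw [pvFoldlAppend, List.nil_append, ← pvPackB_eq m hc]
        rw [hm, pvAltGo, ← hm, List.take_of_length_le h5, List.drop_of_length_le h5, pvAltGo]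
      · -- a full chunk of 5, then recurse on the rest
        have hsplit : m = m.take 5 ++ m.drop 5 := (List.take_append_drop 5 m).symm
        have hlen5 : (m.take 5).length = 5 := by simp; omega
        conv_lhs => rw [hsplit]
        rw [List.foldl_append]
        have hfill := pvFill (m.take 5) [] enc (by simp)
        simp only [List.length_nil, List.nil_append, Nat.zero_add] at hfill
        rw [hfill, hlen5]
        obtain ⟨d, ds, hd⟩ : ∃ d ds, m.drop 5 = d :: ds := by
          cases hdrop : m.drop 5 with
          | nil =>
            exfalso
            have := congrArg List.length hdrop
            simp at this
            omega
          | cons d ds => exact ⟨d, ds, rfl⟩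
        rw [hd, List.foldl_cons]
        have hstep5 : pvStepA ((m.take 5).map pvEnc10, enc, [], 5) d
            = ([pvEnc10 d], enc ++ [pvParse2 (((m.take 5).map pvEnc10).foldl (· ++ ·) [])], [], 1) := by
          simp [pvStepA]
        have hstep0 : pvStepA ([], enc ++ [pvParse2 (((m.take 5).map pvEnc10).foldl (· ++ ·) [])], [], 0) d
            = ([pvEnc10 d], enc ++ [pvParse2 (((m.take 5).map pvEnc10).foldl (· ++ ·) [])], [], 1) := by
          simp [pvStepA]
        rw [hstep5, ← hstep0, ← List.foldl_cons, ← hd]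
        have hcd : ∀ x ∈ m.drop 5, x.toNat < 1024 :=
          fun x hx => hc x (List.mem_of_mem_drop hx)
        rw [ih (m.drop 5) (by simp [hm] at hl ⊢; omega) _ hcd]
        rw [pvFoldlAppend, List.nil_append, ← pvPackB_eq (m.take 5)
          (fun x hx => hc x (List.mem_of_mem_take hx))]
        conv_rhs => rw [hm, pvAltGo, ← hm]
        simp

-- ===== VERDICT (by name: the statement is the Claim_ definition above) =====
theorem split_into_list_spec : Claim_equal_split_into_list := by
  intro s hdom
  unfold Spec_split_into_list split_into_list split_into_list_alt
  have hc : ∀ c ∈ s.toList, c.toNat < 1024 := by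
    intro c hcm
    have := List.all_eq_true.mp hdom c hcm
    simp only [pvDomChar, Bool.or_eq_true, Bool.and_eq_true, decide_eq_true_eq, beq_iff_eq] at this
    omega
  have := pvMain s.toList.length s.toList le_rfl [] hc
  simpa using this
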